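-- pv_equiv track=rewrite | github.com/samdengler/matt-beer-tasting | bin/build-tasting-notes.py | parse_beer_notes
-- ===== SOURCE A (Python) =====
-- def parse_beer_notes(lines):
--     """Parse a single beer's notes into a list of (type, content) tuples.
--
--     Types: 'h3', 'p', 'kicker'
--     """
--     elements = []
--     current_para = []
--
--     def flush_para():
--         if current_para:
--             text = " ".join(current_para)
--             elements.append(("p", text))
--             current_para.clear()
--
--     for line in lines:
--         line = line.strip()
--         if not line:
--             flush_para()
--             continue
--         if line.startswith("### "):
--             flush_para()
--             elements.append(("h3", line[4:]))
--         elif line.startswith("> "):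
--             flush_para()
--             # Strip > and surrounding *italic* markers
--             kicker = line[2:].strip()
--             if kicker.startswith("*") and kicker.endswith("*"):
--                 kicker = kicker[1:-1]
--             elements.append(("kicker", kicker))
--         else:
--             current_para.append(line)
--
--     flush_para()
--     return elements
-- ===== SOURCE B (Python) =====
-- def parse_beer_notes(lines):
--     """Parse a single beer's notes into a list of (type, content) tuples.
--
--     Two passes: first tokenize each line, then coalesce runs of 'p' tokens.
--     """
--     # Pass 1: recognition. None is the paragraph-break sentinel.
--     tokens = []
--     for line in lines:
--         s = line.strip()
--         if not s:
--             tokens.append(None)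
--         elif s.startswith("### "):
--             tokens.append(("h3", s[4:]))
--         elif s.startswith("> "):
--             k = s[2:].strip()
--             if k.startswith("*") and k.endswith("*"):
--                 k = k[1:-1]
--             tokens.append(("kicker", k))
--         else:
--             tokens.append(("p", s))
--
--     # Pass 2: coalesce consecutive 'p' tokens; drop the sentinels.
--     out = []
--     buf = []
--     for tok in tokens + [None]:
--         if tok is not None and tok[0] == "p":
--             buf.append(tok[1])
--         else:
--             if buf:
--                 out.append(("p", " ".join(buf)))
--                 buf = []
--             if tok is not None:
--                 out.append(tok)
--     return out
-- ===== Notes on version B (the rewrite author's own statement) =====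
-- stated objective: alternative
-- what changed: B separates recognition from paragraph coalescing: one pass tokenizes each stripped line into h3/kicker/p tokens with a break sentinel, a second pass merges consecutive p tokens, replacing A's single loop with mutable paragraph-accumulator state and nested flush closure.
import Mathlib
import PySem

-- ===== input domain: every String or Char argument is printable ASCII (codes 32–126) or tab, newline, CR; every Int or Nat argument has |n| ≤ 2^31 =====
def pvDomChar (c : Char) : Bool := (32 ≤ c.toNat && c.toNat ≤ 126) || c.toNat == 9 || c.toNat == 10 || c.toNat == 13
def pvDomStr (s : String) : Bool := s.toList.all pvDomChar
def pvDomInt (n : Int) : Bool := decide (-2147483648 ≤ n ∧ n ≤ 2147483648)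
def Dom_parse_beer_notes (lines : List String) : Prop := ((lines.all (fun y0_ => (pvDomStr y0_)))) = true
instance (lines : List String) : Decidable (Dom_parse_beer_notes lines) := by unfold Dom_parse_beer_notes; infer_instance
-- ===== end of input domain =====

-- B replaces A's single loop (mutable paragraph buffer + flush closure) by two passes:
-- tokenize lines, then coalesce consecutive 'p' tokens; same return value (objective: alternative).

-- ===== PORT A =====
-- the flush_para helper: emit the joined paragraph if non-empty
def pbnFlushList (para : List String) : List (String × String) :=
  if para ≠ [] then [("p", PySem.Str.join " " para)] else []

-- one iteration of A's for-loop over (elements, current_para)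
def pbnStepA (st : List (String × String) × List String) (line : String) :
    List (String × String) × List String :=
  let s := PySem.Str.strip line
  if s = "" then (st.1 ++ pbnFlushList st.2, [])
  else if PySem.Str.startswith s "### " then
    (st.1 ++ pbnFlushList st.2 ++ [("h3", PySem.Str.slice s (some 4) none)], [])
  else if PySem.Str.startswith s "> " then
    let k := PySem.Str.strip (PySem.Str.slice s (some 2) none)
    let k := if PySem.Str.startswith k "*" && PySem.Str.endswith k "*"
             then PySem.Str.slice k (some 1) (some (-1)) else k
    (st.1 ++ pbnFlushList st.2 ++ [("kicker", k)], [])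
  else (st.1, st.2 ++ [s])

def parse_beer_notes (lines : List String) : List (String × String) :=
  let st := lines.foldl pbnStepA ([], [])
  st.1 ++ pbnFlushList st.2

-- ===== PORT B =====
-- pass 1: recognize one line; none = paragraph-break sentinel
def pbnToken (line : String) : Option (String × String) :=
  let s := PySem.Str.strip line
  if s = "" then none
  else if PySem.Str.startswith s "### " then some ("h3", PySem.Str.slice s (some 4) none)
  else if PySem.Str.startswith s "> " then
    let k := PySem.Str.strip (PySem.Str.slice s (some 2) none)
    some ("kicker", if PySem.Str.startswith k "*" && PySem.Str.endswith k "*"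
                    then PySem.Str.slice k (some 1) (some (-1)) else k)
  else some ("p", s)

-- pass 2: coalesce consecutive 'p' tokens, flushing the buffer at sentinels,
-- non-'p' tokens and end of input (Python's trailing `+ [None]`)
def pbnCoalesce : List (Option (String × String)) → List String → List (String × String)
  | [], buf => pbnFlushList buf
  | none :: ts, buf => pbnFlushList buf ++ pbnCoalesce ts []
  | some (k, v) :: ts, buf =>
    if k = "p" then pbnCoalesce ts (buf ++ [v])
    else pbnFlushList buf ++ [(k, v)] ++ pbnCoalesce ts []

def parse_beer_notes_alt (lines : List String) : List (String × String) :=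
  pbnCoalesce (lines.map pbnToken) []

-- ===== PRECONDITION & SPEC =====
def Spec_parse_beer_notes (lines : List String) (out : List (String × String)) : Prop := out = parse_beer_notes_alt lines
instance (lines : List String) (out : List (String × String)) : Decidable (Spec_parse_beer_notes lines out) := by unfold Spec_parse_beer_notes; infer_instance

-- ===== CLAIM (what is proved, stated in full; the proofs are below) =====
def Claim_equal_parse_beer_notes : Prop := ∀ (lines : List String), Dom_parse_beer_notes lines → Spec_parse_beer_notes lines (parse_beer_notes lines)

-- ===== LEMMAS AND PROOFS =====

theorem pbn_strip_empty (l : String) :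
    (PySem.Str.strip l = "") ↔ (PySem.Chars.strip l.toList = []) := by
  rw [← String.toList_inj]; simp

theorem pbn_loop_eq (lines : List String) (elems : List (String × String)) (buf : List String) :
    (lines.foldl pbnStepA (elems, buf)).1 ++ pbnFlushList (lines.foldl pbnStepA (elems, buf)).2
      = elems ++ pbnCoalesce (lines.map pbnToken) buf := by
  induction lines generalizing elems buf with
  | nil => simp [pbnCoalesce]
  | cons l ls ih =>
    simp only [List.foldl_cons, List.map_cons]
    by_cases h0 : PySem.Chars.strip l.toList = []
    · rw [show pbnStepA (elems, buf) l = (elems ++ pbnFlushList buf, []) from by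
            simp [pbnStepA, pbn_strip_empty, h0],
          show pbnToken l = none from by simp [pbnToken, pbn_strip_empty, h0], ih]
      simp [pbnCoalesce]
    · by_cases h1 : PySem.Chars.startswith (PySem.Chars.strip l.toList) ['#','#','#',' '] = true
      · rw [show pbnStepA (elems, buf) l
              = (elems ++ pbnFlushList buf
                  ++ [("h3", PySem.Str.slice (PySem.Str.strip l) (some 4) none)], []) from by
              simp [pbnStepA, pbn_strip_empty, h0, h1],
            show pbnToken l = some ("h3", PySem.Str.slice (PySem.Str.strip l) (some 4) none) from by
              simp [pbnToken, pbn_strip_empty, h0, h1], ih]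
        simp [pbnCoalesce]
      · by_cases h2 : PySem.Chars.startswith (PySem.Chars.strip l.toList) ['>',' '] = true
        · rw [show pbnStepA (elems, buf) l
                = (elems ++ pbnFlushList buf
                    ++ [("kicker",
                          let k := PySem.Str.strip (PySem.Str.slice (PySem.Str.strip l) (some 2) none)
                          if PySem.Str.startswith k "*" && PySem.Str.endswith k "*"
                          then PySem.Str.slice k (some 1) (some (-1)) else k)], []) from by
                simp [pbnStepA, pbn_strip_empty, h0, h1, h2],
              show pbnToken l
                = some ("kicker",
                          let k := PySem.Str.strip (PySem.Str.slice (PySem.Str.strip l) (some 2) none)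
                          if PySem.Str.startswith k "*" && PySem.Str.endswith k "*"
                          then PySem.Str.slice k (some 1) (some (-1)) else k) from by
                simp [pbnToken, pbn_strip_empty, h0, h1, h2], ih]
          simp [pbnCoalesce]
        · rw [show pbnStepA (elems, buf) l = (elems, buf ++ [PySem.Str.strip l]) from by
                simp [pbnStepA, pbn_strip_empty, h0, h1, h2],
              show pbnToken l = some ("p", PySem.Str.strip l) from by
                simp [pbnToken, pbn_strip_empty, h0, h1, h2], ih]
          simp [pbnCoalesce]

-- ===== VERDICT (by name: the statement is the Claim_ definition above) =====
theorem parse_beer_notes_spec : Claim_equal_parse_beer_notes := by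
  intro lines _
  unfold Spec_parse_beer_notes parse_beer_notes parse_beer_notes_alt
  simpa using pbn_loop_eq lines [] []
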